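-- pv_equiv track=rewrite | github.com/ericskim/redax | redax/utils/bv.py | increment_bv
-- ===== SOURCE A (Python) =====
-- from typing import Sequence, Iterable, List
--
-- BitVector = Sequence[bool]
--
-- def int2bv(index: int, nbits: int) -> BitVector:
--     """
--     A really high nbits just right pads the bitvector with "False"
--     """
--
--     return tuple(True if ((index >> i) % 2 == 1) else False
--                  for i in range(nbits - 1, -1, -1)
--                  )
--
-- def increment_bv(bv, increment: int, graycode=False, saturate=False) -> BitVector:
--     """
--     Increment a bitvector's value +1 or -1.
--     """
--     assert increment == 1 or increment == -1
--     nbits = len(bv)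
--     if graycode:
--         index = graytobin(bv2int(bv))
--         index = (index+increment) % 2**nbits
--         return int2bv(bintogray(index), nbits)
--     else:
--         if bv == tuple(True for i in range(nbits)) and increment > 0:
--             if saturate:
--                 return bv
--             raise ValueError("Bitvector overflow for nonperiodic domain.")
--         if bv == tuple(False for i in range(nbits)) and increment < 0:
--             if saturate:
--                 return bv
--             raise ValueError("Bitvector overflow for nonperiodic domain.")
--         return int2bv(bv2int(bv) + increment, nbits)
--
-- def bv2int(bv: BitVector) -> int:
--     """
--     Converts bitvector (list or tuple) with the standard binary encoding into an integer.
--     """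
--     nbits = len(bv)
--     index = 0
--     for i in range(nbits):
--         if bv[i]:
--             index += 2**(nbits - i - 1)
--     return index
--
-- def bintogray(x: int) -> int:
--     """
--     Convert a binary encoded positive integer into gray code.
--     """
--     assert x >= 0
--     return x ^ (x >> 1)
--
-- def graytobin(x: int) -> int:
--     """
--     Convert a gray code encoded positive integer into the standard binary encoding.
--     """
--     assert x >= 0
--     mask = x >> 1
--     while(mask != 0):
--         x = x ^ mask
--         mask = mask >> 1
--     return x
-- ===== SOURCE B (Python) =====
-- def increment_bv(bv, increment, graycode=False, saturate=False):
--     """Increment a bitvector's value +1 or -1, working directly on the bits: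
--     ripple carry/borrow for binary, prefix-xor decode / pairwise-xor encode for gray code."""
--     assert increment == 1 or increment == -1
--     nbits = len(bv)
--     up = increment > 0
--     if graycode:
--         # gray -> binary: each binary bit is the xor of the gray prefix ending there
--         bits = []
--         acc = False
--         for g in bv:
--             acc = acc != g
--             bits.append(acc)
--         # binary +-1; a carry/borrow past the MSB wraps (mod 2**nbits)
--         res = []
--         carry = True
--         for b in reversed(bits):
--             res.append(b != carry)
--             carry = carry and (b == up)
--         res.reverse()
--         # binary -> gray: each gray bit is the xor of two adjacent binary bits
--         out = []
--         prev = False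
--         for b in res:
--             out.append(prev != b)
--             prev = b
--         return tuple(out)
--     if bv == tuple(True for i in range(nbits)) and increment > 0:
--         if saturate:
--             return bv
--         raise ValueError("Bitvector overflow for nonperiodic domain.")
--     if bv == tuple(False for i in range(nbits)) and increment < 0:
--         if saturate:
--             return bv
--         raise ValueError("Bitvector overflow for nonperiodic domain.")
--     # ripple from the least-significant end; a carry/borrow past the MSB wraps
--     res = []
--     carry = True
--     for b in reversed(bv):
--         res.append(b != carry)
--         carry = carry and (b == up)
--     res.reverse()
--     return tuple(res)
-- ===== Notes on version B (the rewrite author's own statement) =====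
-- stated objective: alternative
-- what changed: A round-trips through Python big integers (bv2int/graytobin/bintogray/int2bv); B works directly on the bit list: a ripple carry/borrow pass for the binary branch (a carry past the MSB wraps, matching int2bv's modulo), and prefix-xor decode / ripple / adjacent-xor encode for the gray-code branch; the tuple overflow guards are kept.
import Mathlib
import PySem

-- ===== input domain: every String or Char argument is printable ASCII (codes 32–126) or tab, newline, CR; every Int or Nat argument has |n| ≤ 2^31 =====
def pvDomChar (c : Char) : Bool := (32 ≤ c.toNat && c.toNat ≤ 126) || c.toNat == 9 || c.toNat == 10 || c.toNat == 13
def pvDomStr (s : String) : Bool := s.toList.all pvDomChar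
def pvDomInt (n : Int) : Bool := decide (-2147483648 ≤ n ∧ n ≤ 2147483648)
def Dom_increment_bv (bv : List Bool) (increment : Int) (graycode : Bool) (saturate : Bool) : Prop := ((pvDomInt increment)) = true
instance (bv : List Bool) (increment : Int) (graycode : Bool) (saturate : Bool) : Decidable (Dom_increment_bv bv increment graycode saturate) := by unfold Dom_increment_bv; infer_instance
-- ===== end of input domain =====

-- B replaces A's big-integer round trips (bv2int/graytobin/bintogray/int2bv) by direct passes over
-- the bit list: ripple carry/borrow for binary, prefix-xor decode / adjacent-xor encode for gray code.

-- ===== PORT A =====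
-- int2bv: tuple(True if ((index >> i) % 2 == 1) else False for i in range(nbits-1, -1, -1));
-- Python's `index >> i` on an int i ≥ 0 is exactly Lean's `index >>> i.toNat` (all i in the range are ≥ 0).
def int2bvA (index : Int) (nbits : Int) : List Bool :=
  (PySem.List.pyRange (nbits - 1) (-1) (-1)).map
    (fun i => decide (PySem.Int.mod (index >>> i.toNat) 2 = 1))

-- bv2int: for i in range(nbits): if bv[i]: index += 2**(nbits-i-1)
def bv2intA (bv : List Bool) : Int :=
  (PySem.List.pyRange 0 (bv.length : Int) 1).foldl
    (fun index i =>
      if PySem.List.pyGetD bv i false then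
        index + 2 ^ (((bv.length : Int) - i - 1).toNat)
      else index) 0

def bintograyA (x : Int) : Int := PySem.Int.bxor x (x >>> 1)

-- while mask != 0: x = x ^ mask; mask = mask >> 1.  graytobin asserts x ≥ 0 and is only
-- called on bv2int values (≥ 0), so the mask x >> 1 is a nonnegative int, carried as a Nat.
def graytobinAux (x : Int) (mask : Nat) : Int :=
  if mask = 0 then x else graytobinAux (PySem.Int.bxor x (mask : Int)) (mask / 2)
termination_by mask
decreasing_by exact Nat.div_lt_self (Nat.pos_of_ne_zero (by assumption)) (by omega)

def graytobinA (x : Int) : Int := graytobinAux x ((x >>> 1).toNat)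

def increment_bv (bv : List Bool) (increment : Int) (graycode : Bool) (saturate : Bool) : List Bool :=
  -- `assert increment == 1 or increment == -1` is Pre_increment_bv
  let nbits := bv.length
  if graycode then
    let index := graytobinA (bv2intA bv)
    let index2 := PySem.Int.mod (index + increment) (2 ^ nbits)
    int2bvA (bintograyA index2) (nbits : Int)
  else
    -- overflow guards; the 'raise ValueError' arms (guard fires with saturate=False) are
    -- exactly the inputs excluded by Pre_increment_bv, so returning bv there is never observed
    if bv = List.replicate bv.length true ∧ increment > 0 then bv
    else if bv = List.replicate bv.length false ∧ increment < 0 then bv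
    else int2bvA (bv2intA bv + increment) (nbits : Int)

-- ===== PORT B =====
-- res.append(b != carry); carry = carry and (b == up)
def rippleStep (up : Bool) (st : List Bool × Bool) (b : Bool) : List Bool × Bool :=
  (st.1 ++ [b != st.2], st.2 && (b == up))

-- acc = acc != g; bits.append(acc)
def decStep (st : List Bool × Bool) (g : Bool) : List Bool × Bool :=
  (st.1 ++ [st.2 != g], st.2 != g)

-- out.append(prev != b); prev = b
def encStep (st : List Bool × Bool) (b : Bool) : List Bool × Bool :=
  (st.1 ++ [st.2 != b], b)

def increment_bv_alt (bv : List Bool) (increment : Int) (graycode : Bool) (saturate : Bool) : List Bool :=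
  let up := decide (increment > 0)
  if graycode then
    -- gray -> binary (prefix xor), ripple +-1 with wrap, binary -> gray (adjacent xor)
    let bits := (bv.foldl decStep ([], false)).1
    let res := (bits.reverse.foldl (rippleStep up) ([], true)).1.reverse
    (res.foldl encStep ([], false)).1
  else
    -- same overflow guards as A (the raising arms are outside Pre_increment_bv), then
    -- `for b in reversed(bv): ...` and `res.reverse()`
    if bv = List.replicate bv.length true ∧ increment > 0 then bv
    else if bv = List.replicate bv.length false ∧ increment < 0 then bv
    else (bv.reverse.foldl (rippleStep up) ([], true)).1.reverse

-- ===== PRECONDITION & SPEC =====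
-- A raises AssertionError unless increment is +-1, and raises ValueError on binary overflow
-- (all-True bv with +1, or all-False bv with -1) when saturate is False; Pre_ excludes exactly
-- those raising inputs.
def Pre_increment_bv (bv : List Bool) (increment : Int) (graycode : Bool) (saturate : Bool) : Prop :=
  (increment = 1 ∨ increment = -1) ∧
  (graycode = true ∨ saturate = true ∨
    (¬(bv = List.replicate bv.length true ∧ increment > 0) ∧
     ¬(bv = List.replicate bv.length false ∧ increment < 0)))
instance (bv : List Bool) (increment : Int) (graycode : Bool) (saturate : Bool) : Decidable (Pre_increment_bv bv increment graycode saturate) := by unfold Pre_increment_bv; infer_instance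

def pvWitness_increment_bv : List Bool × Int × Bool × Bool := ([true, false, true], 1, false, false)

def Spec_increment_bv (bv : List Bool) (increment : Int) (graycode : Bool) (saturate : Bool) (out : List Bool) : Prop := out = increment_bv_alt bv increment graycode saturate
instance (bv : List Bool) (increment : Int) (graycode : Bool) (saturate : Bool) (out : List Bool) : Decidable (Spec_increment_bv bv increment graycode saturate out) := by unfold Spec_increment_bv; infer_instance

-- ===== CLAIM (what is proved, stated in full; the proofs are below) =====
def Claim_equal_increment_bv : Prop := ∀ (bv : List Bool) (increment : Int) (graycode : Bool) (saturate : Bool), Dom_increment_bv bv increment graycode saturate → Pre_increment_bv bv increment graycode saturate → Spec_increment_bv bv increment graycode saturate (increment_bv bv increment graycode saturate)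

-- ===== LEMMAS AND PROOFS =====

-- the value of a bitvector (MSB first), and the structural form of B's ripple pass
def binVal : List Bool → Nat
  | [] => 0
  | b :: t => (cond b (2 ^ t.length) 0) + binVal t

def ripple (up : Bool) : List Bool → List Bool × Bool
  | [] => ([], true)
  | b :: t => ((b != (ripple up t).2) :: (ripple up t).1, (ripple up t).2 && (b == up))

theorem fold_ripple (up : Bool) (bv : List Bool) :
    bv.reverse.foldl (rippleStep up) ([], true) = ((ripple up bv).1.reverse, (ripple up bv).2) := by
  induction bv with
  | nil => rfl
  | cons b t ih =>
    simp [List.reverse_cons, List.foldl_append, ih, rippleStep, ripple]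

theorem carry_true (t : List Bool) : (ripple true t).2 = t.all id := by
  induction t with
  | nil => rfl
  | cons b t ih => simp [ripple, ih, List.all_cons, Bool.and_comm]

theorem carry_false (t : List Bool) : (ripple false t).2 = t.all (fun b => !b) := by
  induction t with
  | nil => rfl
  | cons b t ih =>
    cases b <;> simp [ripple, ih, List.all_cons, Bool.and_comm]

theorem binVal_lt (t : List Bool) : binVal t < 2 ^ t.length := by
  induction t with
  | nil => simp [binVal]
  | cons b t ih => cases b <;> simp [binVal, pow_succ] <;> omega

theorem binVal_eq_zero (t : List Bool) : binVal t = 0 ↔ t.all (fun b => !b) = true := by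
  induction t with
  | nil => simp [binVal]
  | cons b t ih =>
    cases b <;> simp [binVal, List.all_cons, ih]

theorem binVal_all_true (t : List Bool) : t.all id = true ↔ binVal t + 1 = 2 ^ t.length := by
  induction t with
  | nil => simp [binVal]
  | cons b t ih =>
    have hlt := binVal_lt t
    cases b <;> simp [binVal, List.all_cons, ih, pow_succ] <;> omega

theorem shiftR_natCast (m k : Nat) : ((m : Int) >>> k) = ((m >>> k : Nat) : Int) := by
  simp [Int.shiftRight_eq, Int.natCast_shiftRight]

theorem shiftR_neg_one (k : Nat) : ((-1 : Int) >>> k) = -1 := by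
  show Int.shiftRight (Int.negSucc 0) k = Int.negSucc 0
  unfold Int.shiftRight
  simp

theorem bit_eq_testBit (m k : Nat) :
    decide (PySem.Int.mod ((m : Int) >>> k) 2 = 1) = Nat.testBit m k := by
  rw [shiftR_natCast, Nat.testBit_eq_decide_div_mod_eq]
  simp [Nat.shiftRight_eq_div_pow]
  norm_cast

theorem int2bvA_zero (x : Int) : int2bvA x 0 = [] := by
  rw [int2bvA, PySem.List.pyRange_neg_one_eq_nil (by omega)]
  rfl

theorem int2bvA_succ (x : Int) (n : Nat) :
    int2bvA x ((n : Int) + 1) =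
      decide (PySem.Int.mod (x >>> n) 2 = 1) :: int2bvA x (n : Int) := by
  have h : ((n : Int) + 1) - 1 = (n : Int) := by ring
  rw [int2bvA, h, PySem.List.pyRange_neg_one_cons (by omega), List.map_cons]
  congr 1
  simp only [Int.toNat_natCast, Int.shiftRight_natCast_right]

theorem int2bvA_neg_one (n : Nat) : int2bvA (-1) (n : Int) = List.replicate n true := by
  induction n with
  | zero => simpa using int2bvA_zero (-1)
  | succ n ih =>
    rw [Nat.cast_succ, int2bvA_succ, ih, shiftR_neg_one]
    rfl

theorem int2bvA_congr (n : Nat) (m m' : Nat)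
    (h : ∀ i < n, m.testBit i = m'.testBit i) :
    int2bvA (m : Int) (n : Int) = int2bvA (m' : Int) (n : Int) := by
  induction n with
  | zero => simp [int2bvA_zero]
  | succ n ih =>
    rw [Nat.cast_succ, int2bvA_succ, int2bvA_succ, bit_eq_testBit, bit_eq_testBit,
      h n (by omega), ih (fun i hi => h i (by omega))]

theorem int2bvA_mod (m n : Nat) :
    int2bvA ((m % 2 ^ n : Nat) : Int) (n : Int) = int2bvA (m : Int) (n : Int) :=
  int2bvA_congr n _ _ (fun i hi => by simp [Nat.testBit_mod_two_pow, hi])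

theorem int2bvA_two_pow_sub_one (n : Nat) :
    int2bvA ((2 ^ n - 1 : Nat) : Int) (n : Int) = List.replicate n true := by
  induction n with
  | zero => simpa using int2bvA_zero 0
  | succ n ih =>
    rw [Nat.cast_succ, int2bvA_succ, bit_eq_testBit]
    rw [Nat.testBit_two_pow_sub_one]
    rw [int2bvA_congr n _ (2 ^ n - 1)
      (fun i hi => by simp [Nat.testBit_two_pow_sub_one]; omega), ih]
    simp [List.replicate_succ]

theorem ripple_all_false (t : List Bool) (h : t.all (fun b => !b) = true) :
    (ripple false t).1 = List.replicate t.length true := by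
  induction t with
  | nil => rfl
  | cons b t ih =>
    simp only [List.all_cons, Bool.and_eq_true] at h
    obtain ⟨hb, ht⟩ := h
    cases b
    · simp [ripple, carry_false, ht, ih ht, List.replicate_succ]
    · simp at hb

theorem all_eq_false {p : Bool → Bool} (t : List Bool) (h : ¬ t.all p = true) :
    t.all p = false := by
  cases h' : t.all p
  · rfl
  · exact absurd h' h

theorem main_add (bv : List Bool) :
    int2bvA ((binVal bv : Int) + 1) (bv.length : Int) = (ripple true bv).1 := by
  induction bv with
  | nil => simpa [binVal] using int2bvA_zero 1
  | cons b t ih =>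
    have hlt := binVal_lt t
    have hcast : ((binVal (b :: t) : Int) + 1) = ((binVal (b :: t) + 1 : Nat) : Int) := by
      push_cast; ring
    have hlen : (((b :: t).length : Nat) : Int) = ((t.length : Int) + 1) := by
      simp
    rw [hcast, hlen, int2bvA_succ, bit_eq_testBit]
    have hbits : ∀ i < t.length,
        Nat.testBit (binVal (b :: t) + 1) i = Nat.testBit (binVal t + 1) i := by
      intro i hi
      cases b
      · simp [binVal]
      · simp only [binVal, cond_true]
        rw [show 2 ^ t.length + binVal t + 1 = 2 ^ t.length + (binVal t + 1) by ring]
        rw [Nat.testBit_two_pow_add_gt hi]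
    have htail : int2bvA ((binVal (b :: t) + 1 : Nat) : Int) ((t.length : Nat) : Int)
        = (ripple true t).1 := by
      rw [int2bvA_congr t.length _ _ hbits]
      rw [show ((binVal t + 1 : Nat) : Int) = (binVal t : Int) + 1 by push_cast; ring]
      exact ih
    rw [htail]
    simp only [ripple]
    congr 1
    rw [carry_true]
    by_cases hall : t.all id = true
    · have hv : binVal t + 1 = 2 ^ t.length := (binVal_all_true t).mp hall
      cases b
      · simp only [binVal, cond_false, Nat.zero_add, hv, hall]
        simp [Nat.testBit_two_pow_self]
      · simp only [binVal, cond_true, hall]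
        rw [show 2 ^ t.length + binVal t + 1 = 2 ^ t.length + (binVal t + 1) by ring,
          Nat.testBit_two_pow_add_eq, hv, Nat.testBit_two_pow_self]
        simp
    · have hv : binVal t + 1 < 2 ^ t.length := by
        rcases Nat.lt_or_ge (binVal t + 1) (2 ^ t.length) with h | h
        · exact h
        · exact absurd ((binVal_all_true t).mpr (by omega)) hall
      have hbf : Nat.testBit (binVal t + 1) t.length = false := Nat.testBit_lt_two_pow hv
      have hallf : t.all id = false := all_eq_false t hall
      cases b
      · simp only [binVal, cond_false, Nat.zero_add, hbf, hallf]
        simp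
      · simp only [binVal, cond_true, hallf]
        rw [show 2 ^ t.length + binVal t + 1 = 2 ^ t.length + (binVal t + 1) by ring,
          Nat.testBit_two_pow_add_eq, hbf]
        simp

theorem main_sub (bv : List Bool) (h : binVal bv ≠ 0) :
    int2bvA ((binVal bv : Int) - 1) (bv.length : Int) = (ripple false bv).1 := by
  induction bv with
  | nil => exact absurd rfl h
  | cons b t ih =>
    have hlt := binVal_lt t
    have hcast : ((binVal (b :: t) : Int) - 1) = ((binVal (b :: t) - 1 : Nat) : Int) := by
      have : 1 ≤ binVal (b :: t) := Nat.pos_of_ne_zero h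
      omega
    have hlen : (((b :: t).length : Nat) : Int) = ((t.length : Int) + 1) := by
      simp
    rw [hcast, hlen, int2bvA_succ, bit_eq_testBit]
    simp only [ripple]
    by_cases hvt : binVal t = 0
    · have hallf : t.all (fun x => !x) = true := (binVal_eq_zero t).mp hvt
      have hb : b = true := by
        cases b
        · exact absurd (by simp [binVal, hvt]) h
        · rfl
      subst hb
      have hm : binVal (true :: t) - 1 = 2 ^ t.length - 1 := by
        simp [binVal, hvt]
      rw [hm]
      congr 1
      · rw [Nat.testBit_lt_two_pow (by omega)]
        simp [carry_false, hallf]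
      · rw [int2bvA_two_pow_sub_one, ripple_all_false t hallf]
    · have hvt1 : 1 ≤ binVal t := Nat.pos_of_ne_zero hvt
      have hnall : t.all (fun x => !x) = false :=
        all_eq_false t (fun hx => hvt ((binVal_eq_zero t).mpr hx))
      have hbits : ∀ i < t.length,
          Nat.testBit (binVal (b :: t) - 1) i = Nat.testBit (binVal t - 1) i := by
        intro i hi
        cases b
        · simp [binVal]
        · simp only [binVal, cond_true]
          rw [show 2 ^ t.length + binVal t - 1 = 2 ^ t.length + (binVal t - 1) by omega]
          rw [Nat.testBit_two_pow_add_gt hi]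
      have htail : int2bvA ((binVal (b :: t) - 1 : Nat) : Int) ((t.length : Nat) : Int)
          = (ripple false t).1 := by
        rw [int2bvA_congr t.length _ _ hbits]
        rw [show ((binVal t - 1 : Nat) : Int) = (binVal t : Int) - 1 by omega]
        exact ih hvt
      rw [htail]
      congr 1
      rw [carry_false, hnall]
      have hbit : Nat.testBit (binVal t - 1) t.length = false :=
        Nat.testBit_lt_two_pow (by omega)
      cases b
      · simp only [binVal, cond_false, Nat.zero_add, hbit]
        simp
      · simp only [binVal, cond_true]
        rw [show 2 ^ t.length + binVal t - 1 = 2 ^ t.length + (binVal t - 1) by omega,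
          Nat.testBit_two_pow_add_eq, hbit]
        simp

theorem sumVal (bv : List Bool) :
    ((List.range bv.length).map
      (fun k => if bv.getD k false then (2 : Int) ^ (bv.length - k - 1) else 0)).sum
      = (binVal bv : Int) := by
  induction bv with
  | nil => simp [binVal]
  | cons b t ih =>
    rw [List.length_cons, List.range_succ_eq_map, List.map_cons, List.map_map, List.sum_cons]
    have h1 : ((List.range t.length).map
        ((fun k => if (b :: t).getD k false then (2 : Int) ^ (t.length + 1 - k - 1) else 0) ∘ Nat.succ)).sum
        = (binVal t : Int) := by
      rw [← ih]
      congr 1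
      refine List.map_congr_left (fun k hk => ?_)
      simp [Function.comp, Nat.succ_sub_succ]
    rw [h1]
    cases b <;> simp [binVal] <;> push_cast <;> ring

theorem bv2intA_eq (bv : List Bool) : bv2intA bv = (binVal bv : Int) := by
  unfold bv2intA
  rw [PySem.List.pyRange_one]
  simp only [Int.sub_zero, Int.toNat_natCast]
  rw [List.foldl_map]
  refine (PySem.List.foldl_congr_mem _ _
    (fun (a : Int) (k : Nat) =>
      a + (if bv.getD k false then (2 : Int) ^ (bv.length - k - 1) else 0)) 0 ?_).trans ?_
  · intro acc k hk
    have hk' : k < bv.length := List.mem_range.mp hk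
    have hg : PySem.List.pyGetD bv (0 + (k : Int)) false = bv.getD k false := by
      rw [show ((0 : Int) + (k : Int)) = ((k : Nat) : Int) by ring]
      exact PySem.List.pyGetD_natCast bv k false
    rw [hg]
    cases hb : bv.getD k false
    · simp only [hb, Bool.false_eq_true, if_false]
      ring
    · simp only [hb, if_true]
      congr 1
      congr 1
      omega
  · rw [PySem.List.foldl_add, sumVal]
    ring

-- ----- gray-code machinery -----

theorem bne_eq_xor (a b : Bool) : (a != b) = a.xor b := by cases a <;> cases b <;> rfl

-- the integer gray-to-binary map computed by A's while loop: G m = m ^ (m>>1) ^ (m>>2) ^ ...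
def grayG (m : Nat) : Nat :=
  if m = 0 then 0 else m ^^^ grayG (m / 2)
termination_by m
decreasing_by exact Nat.div_lt_self (Nat.pos_of_ne_zero (by assumption)) (by omega)

-- parity of the number of set bits
def parN (m : Nat) : Bool :=
  if m = 0 then false else (decide (m % 2 = 1)).xor (parN (m / 2))
termination_by m
decreasing_by exact Nat.div_lt_self (Nat.pos_of_ne_zero (by assumption)) (by omega)

-- structural forms of B's three gray-branch loops
def decodeSeed (c : Bool) : List Bool → List Bool
  | [] => []
  | g :: t => (c != g) :: decodeSeed (c != g) t

def xorFold (c : Bool) : List Bool → Bool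
  | [] => c
  | g :: t => xorFold (c != g) t

def encSeed (p : Bool) : List Bool → List Bool
  | [] => []
  | b :: t => (p != b) :: encSeed b t

theorem dec_fold (bv : List Bool) : ∀ (acc : List Bool) (c : Bool),
    bv.foldl decStep (acc, c) = (acc ++ decodeSeed c bv, xorFold c bv) := by
  induction bv with
  | nil => intro acc c; simp [decodeSeed, xorFold]
  | cons g t ih =>
    intro acc c
    simp [List.foldl_cons, decStep, decodeSeed, xorFold, ih]

theorem enc_fold (r : List Bool) : ∀ (acc : List Bool) (p : Bool),
    (r.foldl encStep (acc, p)).1 = acc ++ encSeed p r := by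
  induction r with
  | nil => intro acc p; simp [encSeed]
  | cons b t ih =>
    intro acc p
    simp [List.foldl_cons, encStep, encSeed, ih]

theorem length_decodeSeed (bv : List Bool) : ∀ c, (decodeSeed c bv).length = bv.length := by
  induction bv with
  | nil => intro c; rfl
  | cons g t ih => intro c; simp [decodeSeed, ih]

theorem decodeSeed_append (t : List Bool) : ∀ (c g : Bool),
    decodeSeed c (t ++ [g]) = decodeSeed c t ++ [xorFold c t != g] := by
  induction t with
  | nil => intro c g; simp [decodeSeed, xorFold]
  | cons b t ih => intro c g; simp [decodeSeed, xorFold, ih]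

theorem xorFold_append (t : List Bool) : ∀ (c g : Bool),
    xorFold c (t ++ [g]) = (xorFold c t != g) := by
  induction t with
  | nil => intro c g; rfl
  | cons b t ih => intro c g; simp [xorFold, ih]

theorem binVal_append (t : List Bool) (g : Bool) :
    binVal (t ++ [g]) = 2 * binVal t + g.toNat := by
  induction t with
  | nil => cases g <;> rfl
  | cons b t ih =>
    cases b <;> simp [binVal, ih, List.length_append, pow_succ] <;> ring

theorem parN_bit (v : Nat) (b : Bool) : parN (2 * v + b.toNat) = b.xor (parN v) := by
  rw [parN]
  by_cases h : 2 * v + b.toNat = 0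
  · have hv : v = 0 := by omega
    have hb : b = false := by cases b; rfl; simp at h
    subst hv; subst hb
    simp [parN]
  · rw [if_neg h]
    have h2 : (2 * v + b.toNat) / 2 = v := by cases b <;> simp <;> omega
    have h1 : decide ((2 * v + b.toNat) % 2 = 1) = b := by
      cases b <;> simp <;> omega
    rw [h1, h2]

theorem grayG_bit (v : Nat) : ∀ (b : Bool),
    grayG (2 * v + b.toNat) = 2 * grayG v + (b.xor (parN v)).toNat := by
  induction v using Nat.strong_induction_on with
  | _ v ih =>
    intro b
    rw [grayG]
    by_cases h0 : 2 * v + b.toNat = 0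
    · have hv : v = 0 := by omega
      have hb : b = false := by cases b; rfl; simp at h0
      subst hv; subst hb
      simp [grayG, parN]
    · rw [if_neg h0]
      have hdiv : (2 * v + b.toNat) / 2 = v := by cases b <;> simp <;> omega
      rw [hdiv]
      by_cases hv : v = 0
      · subst hv; cases b <;> simp_all [grayG, parN]
      · have hv2 : v = 2 * (v / 2) + (decide (v % 2 = 1)).toNat := by
          rcases Nat.mod_two_eq_zero_or_one v with h | h <;> simp [h] <;> omega
        have hG : grayG v
            = 2 * grayG (v / 2) + ((decide (v % 2 = 1)).xor (parN (v / 2))).toNat := by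
          conv_lhs => rw [hv2]
          exact ih (v / 2) (Nat.div_lt_self (Nat.pos_of_ne_zero hv) (by omega)) _
        have hpar : parN v = (decide (v % 2 = 1)).xor (parN (v / 2)) := by
          conv_lhs => rw [hv2]
          rw [parN_bit]
        rw [hG, ← Nat.bit_val, ← Nat.bit_val, Nat.xor_bit, Nat.bit_val]
        have hbit : Nat.bit (decide (v % 2 = 1) ^^ parN (v / 2)) (grayG (v / 2))
            = v ^^^ grayG (v / 2) := by
          rw [Nat.bit_val, ← hG, grayG, if_neg hv]
        rw [hbit, hpar, bne_eq_xor]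

-- A's graytobin loop on a nonnegative int computes grayG
theorem graytobinAux_natCast (mask : Nat) : ∀ (x : Nat),
    graytobinAux (x : Int) mask = ((x ^^^ grayG mask : Nat) : Int) := by
  induction mask using Nat.strong_induction_on with
  | _ mask ih =>
    intro x
    rw [graytobinAux, grayG]
    by_cases h : mask = 0
    · simp [h]
    · rw [if_neg h, if_neg h, PySem.Int.bxor_natCast,
        ih (mask / 2) (Nat.div_lt_self (Nat.pos_of_ne_zero h) (by omega)) (x ^^^ mask),
        Nat.xor_assoc]

theorem shiftR_one_nat (m : Nat) : ((m : Int) >>> (1 : Int)) = ((m / 2 : Nat) : Int) := by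
  rw [show (1 : Int) = ((1 : Nat) : Int) by norm_num, Int.shiftRight_natCast_right,
    shiftR_natCast, Nat.shiftRight_one]

theorem graytobin_natCast (m : Nat) : graytobinA (m : Int) = ((grayG m : Nat) : Int) := by
  rw [graytobinA, shiftR_one_nat, Int.toNat_natCast, graytobinAux_natCast]
  by_cases h : m = 0
  · simp [h, grayG]
  · rw [show grayG m = m ^^^ grayG (m / 2) by rw [grayG, if_neg h]]

theorem bintogray_natCast (m : Nat) :
    bintograyA (m : Int) = ((m ^^^ m / 2 : Nat) : Int) := by
  rw [bintograyA, shiftR_one_nat, PySem.Int.bxor_natCast]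

-- gray decode on the bit level: B's prefix-xor list has the value grayG (value of bv)
theorem gray_decode (bv : List Bool) :
    grayG (binVal bv) = binVal (decodeSeed false bv) ∧ parN (binVal bv) = xorFold false bv := by
  induction bv using List.reverseRecOn with
  | nil => constructor <;> simp [binVal, grayG, parN, decodeSeed, xorFold]
  | append_singleton t g ih =>
    obtain ⟨ih1, ih2⟩ := ih
    constructor
    · rw [binVal_append, grayG_bit, decodeSeed_append, binVal_append, ih1, ih2,
        bne_eq_xor, Bool.xor_comm]
    · rw [binVal_append, parN_bit, xorFold_append, ih2, bne_eq_xor, Bool.xor_comm]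

-- gray encode on the bit level
theorem enc_testBit (n : Nat) (m : Nat) :
    int2bvA ((m ^^^ m / 2 : Nat) : Int) (n : Int)
      = encSeed (Nat.testBit m n) (int2bvA (m : Int) (n : Int)) := by
  induction n with
  | zero =>
    rw [show ((0 : Nat) : Int) = (0 : Int) by norm_num, int2bvA_zero, int2bvA_zero]
    rfl
  | succ n ih =>
    rw [Nat.cast_succ, int2bvA_succ, int2bvA_succ, bit_eq_testBit, bit_eq_testBit, ih]
    show _ :: _ = encSeed _ (_ :: _)
    rw [encSeed]
    congr 1
    rw [Nat.testBit_xor, Nat.testBit_div_two, bne_eq_xor, Bool.xor_comm]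

-- ripple of +-1 on the decoded bits equals A's (value +- 1) mod 2^n, re-encoded
theorem mod_result (d : List Bool) (inc : Int) (hpre : inc = 1 ∨ inc = -1) :
    int2bvA (PySem.Int.mod ((binVal d : Int) + inc) (2 ^ d.length)) (d.length : Int)
      = (ripple (decide (inc > 0)) d).1 := by
  have hp : (0 : Int) < 2 ^ d.length := by positivity
  have hcast : ((2 : Int) ^ d.length) = ((2 ^ d.length : Nat) : Int) := by push_cast; ring
  rcases hpre with h1 | h1 <;> subst h1
  · rw [show decide ((1 : Int) > 0) = true from rfl]
    rw [show (binVal d : Int) + 1 = ((binVal d + 1 : Nat) : Int) by push_cast; ring, hcast,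
      PySem.Int.mod_natCast, int2bvA_mod,
      show ((binVal d + 1 : Nat) : Int) = (binVal d : Int) + 1 by push_cast; ring]
    exact main_add d
  · rw [show decide ((-1 : Int) > 0) = false from rfl]
    by_cases h0 : binVal d = 0
    · have hall : d.all (fun b => !b) = true := (binVal_eq_zero d).mp h0
      have hm : PySem.Int.mod ((binVal d : Int) + -1) (2 ^ d.length)
          = ((2 ^ d.length - 1 : Nat) : Int) := by
        rw [h0, PySem.Int.mod_eq_emod_of_pos hp]
        have h2 : (1 : Int) ≤ 2 ^ d.length := one_le_pow₀ (by norm_num)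
        have h1 : ((0 : Nat) : Int) + -1 = (2 ^ d.length - 1) + 2 ^ d.length * (-1) := by
          push_cast; ring
        rw [h1, Int.add_mul_emod_self_left, Int.emod_eq_of_lt (by omega) (by omega)]
        have h3 : (1 : Nat) ≤ 2 ^ d.length := Nat.one_le_two_pow
        push_cast [h3]
        ring
      rw [hm, int2bvA_two_pow_sub_one, ripple_all_false d hall]
    · have h1 : 1 ≤ binVal d := Nat.pos_of_ne_zero h0
      have hlt : binVal d - 1 < 2 ^ d.length := by
        have := binVal_lt d; omega
      have hm : PySem.Int.mod ((binVal d : Int) + -1) (2 ^ d.length)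
          = ((binVal d - 1 : Nat) : Int) := by
        rw [show (binVal d : Int) + -1 = ((binVal d - 1 : Nat) : Int) by omega, hcast,
          PySem.Int.mod_natCast, Nat.mod_eq_of_lt hlt]
      rw [hm, show ((binVal d - 1 : Nat) : Int) = (binVal d : Int) - 1 by omega]
      exact main_sub d h0

-- gray-code pipeline equivalence, assembled below from the decode/ripple/encode lemmas
theorem gray_eq (bv : List Bool) (inc : Int) (hpre : inc = 1 ∨ inc = -1) :
    int2bvA (bintograyA (PySem.Int.mod (graytobinA (bv2intA bv) + inc) (2 ^ bv.length)))
        (bv.length : Int)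
      = ((((bv.foldl decStep ([], false)).1.reverse.foldl
            (rippleStep (decide (inc > 0))) ([], true)).1.reverse).foldl
          encStep ([], false)).1 := by
  rw [dec_fold, List.nil_append]
  rw [fold_ripple, List.reverse_reverse, enc_fold, List.nil_append]
  set d : List Bool := decodeSeed false bv with hd
  have hlen : d.length = bv.length := length_decodeSeed bv false
  rw [bv2intA_eq, graytobin_natCast, (gray_decode bv).1, ← hd]
  have hp : (0 : Int) < 2 ^ bv.length := by positivity
  set M : Int := PySem.Int.mod ((binVal d : Int) + inc) (2 ^ bv.length) with hM
  have hM0 : 0 ≤ M := PySem.Int.mod_nonneg _ (by positivity)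
  have hMlt : M < 2 ^ bv.length := PySem.Int.mod_lt _ (by positivity)
  have hMn : M = ((M.toNat : Nat) : Int) := (Int.toNat_of_nonneg hM0).symm
  have hlt : M.toNat < 2 ^ bv.length := by
    have : ((M.toNat : Nat) : Int) < ((2 ^ bv.length : Nat) : Int) := by
      push_cast; omega
    exact_mod_cast this
  rw [hMn, bintogray_natCast, enc_testBit, Nat.testBit_lt_two_pow hlt, ← hMn]
  have := mod_result d inc hpre
  rw [hlen] at this
  rw [hM, this]

-- ===== VERDICT (by name: the statement is the Claim_ definition above) =====
theorem increment_bv_spec : Claim_equal_increment_bv := by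
  intro bv increment graycode saturate _ hpre
  obtain ⟨hinc, -⟩ := hpre
  unfold Spec_increment_bv increment_bv increment_bv_alt
  cases graycode with
  | true => exact gray_eq bv increment hinc
  | false =>
    simp only [Bool.false_eq_true, if_false]
    split_ifs with hg1 hg2
    · rfl
    · rfl
    rw [fold_ripple, List.reverse_reverse, bv2intA_eq]
    rcases hinc with h1 | h1 <;> subst h1
    · rw [show decide ((1 : Int) > 0) = true from rfl, main_add bv]
    · rw [show decide ((-1 : Int) > 0) = false from rfl]
      by_cases h0 : binVal bv = 0
      · rw [h0]
        have hall : bv.all (fun b => !b) = true := (binVal_eq_zero bv).mp h0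
        rw [show ((0 : Nat) : Int) + -1 = -1 by ring, int2bvA_neg_one,
          ripple_all_false bv hall]
      · rw [show (binVal bv : Int) + -1 = (binVal bv : Int) - 1 by ring, main_sub bv h0]
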